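-- pv_equiv track=rewrite | github.com/Joacoromero06/Proyects | numerical_analysis/Estudio_representacion/utils/funciones.py | quitar_1er_digito
-- ===== SOURCE A (Python) =====
-- def quitar_1er_digito(x_ent: int) -> int:
--     x = 0
--     e = 0
--     while x_ent >= 10:
--         x = x + (x_ent % 10) * (10**e)
--         x_ent = x_ent // 10
--         e = e + 1
--     return x
-- ===== SOURCE B (Python) =====
-- def quitar_1er_digito(x_ent: int) -> int:
--     if x_ent < 10:
--         return 0
--     p = 10
--     while p * 10 <= x_ent:
--         p *= 10
--     return x_ent % p
-- ===== Notes on version B (the rewrite author's own statement) =====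
-- stated objective: simpler
-- what changed: Instead of reconstructing the low digits one at a time with an accumulator and a growing power of ten, B finds the highest power of ten not exceeding the input and returns a single modulo; the x_ent < 10 guard covers the inputs (negatives and 0-9) on which A's loop never runs.
import Mathlib
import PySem

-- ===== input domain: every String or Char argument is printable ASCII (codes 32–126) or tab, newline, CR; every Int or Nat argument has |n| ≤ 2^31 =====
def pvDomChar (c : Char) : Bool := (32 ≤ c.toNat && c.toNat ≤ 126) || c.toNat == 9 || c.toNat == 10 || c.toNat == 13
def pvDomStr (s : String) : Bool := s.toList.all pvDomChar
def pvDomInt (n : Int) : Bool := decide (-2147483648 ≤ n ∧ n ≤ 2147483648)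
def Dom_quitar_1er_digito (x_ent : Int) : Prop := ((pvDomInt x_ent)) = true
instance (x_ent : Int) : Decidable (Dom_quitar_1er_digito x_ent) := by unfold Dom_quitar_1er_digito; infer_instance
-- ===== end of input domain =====

-- B replaces A's digit-by-digit reconstruction of the low digits by finding the highest
-- power of ten not exceeding the input and taking a single modulo (objective: simpler).

-- ===== PORT A =====
-- A's while loop: state (x_ent, x, e); e only ever holds 0,1,2,… so it is carried as a Nat.
def pvLoopA (x_ent x : Int) (e : Nat) : Int :=
  if h : 10 ≤ x_ent then
    pvLoopA (PySem.Int.floordiv x_ent 10) (x + (PySem.Int.mod x_ent 10) * 10 ^ e) (e + 1)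
  else
    x
termination_by x_ent.toNat
decreasing_by
  rw [PySem.Int.floordiv_eq_ediv_of_pos (by norm_num : (0:ℤ) < 10)]
  omega

def quitar_1er_digito (x_ent : Int) : Int := pvLoopA x_ent 0 0

-- ===== PORT B =====
-- B's while loop: grow p by tens while p*10 ≤ x_ent.  The '0 < p' conjunct is a totality
-- guard only: Source B reaches this loop only with p = 10, and then it is always true.
def pvLoopB (x_ent p : Int) : Int :=
  if h : 0 < p ∧ p * 10 ≤ x_ent then
    pvLoopB x_ent (p * 10)
  else
    p
termination_by (x_ent - p).toNat
decreasing_by omega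

def quitar_1er_digito_alt (x_ent : Int) : Int :=
  if x_ent < 10 then 0
  else PySem.Int.mod x_ent (pvLoopB x_ent 10)

-- ===== PRECONDITION & SPEC =====
def Spec_quitar_1er_digito (x_ent : Int) (out : Int) : Prop := out = quitar_1er_digito_alt x_ent
instance (x_ent : Int) (out : Int) : Decidable (Spec_quitar_1er_digito x_ent out) := by unfold Spec_quitar_1er_digito; infer_instance

-- ===== CLAIM (what is proved, stated in full; the proofs are below) =====
def Claim_equal_quitar_1er_digito : Prop := ∀ (x_ent : Int), Dom_quitar_1er_digito x_ent → Spec_quitar_1er_digito x_ent (quitar_1er_digito x_ent)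

-- ===== LEMMAS AND PROOFS =====

-- A's accumulator is affine: running the loop with accumulator acc and exponent e just
-- shifts and offsets the run from (0,0).
theorem pvLoopA_shift_aux : ∀ (n : Nat) (x acc : Int) (e : Nat), x.toNat ≤ n →
    pvLoopA x acc e = acc + 10 ^ e * pvLoopA x 0 0 := by
  intro n
  induction n with
  | zero =>
    intro x acc e hn
    have hx : ¬ (10:ℤ) ≤ x := by omega
    rw [pvLoopA, dif_neg hx, pvLoopA, dif_neg hx]
    ring
  | succ n ih =>
    intro x acc e hn
    by_cases h : (10:ℤ) ≤ x
    · have hx' : (PySem.Int.floordiv x 10).toNat ≤ n := by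
        rw [PySem.Int.floordiv_eq_ediv_of_pos (by norm_num : (0:ℤ) < 10)]
        omega
      rw [pvLoopA, dif_pos h, ih _ _ _ hx']
      conv_rhs => rw [pvLoopA, dif_pos h, ih _ _ _ hx']
      ring
    · rw [pvLoopA, dif_neg h, pvLoopA, dif_neg h]
      ring

theorem pvLoopA_shift (x acc : Int) (e : Nat) :
    pvLoopA x acc e = acc + 10 ^ e * pvLoopA x 0 0 :=
  pvLoopA_shift_aux x.toNat x acc e le_rfl

-- the loop recurrence in arithmetic form
theorem pvLoopA_rec (x : Int) (hx : 10 ≤ x) :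
    pvLoopA x 0 0 = x % 10 + 10 * pvLoopA (x / 10) 0 0 := by
  rw [pvLoopA, dif_pos hx, pvLoopA_shift,
    PySem.Int.floordiv_eq_ediv_of_pos (by norm_num : (0:ℤ) < 10),
    PySem.Int.mod_eq_emod_of_pos (by norm_num : (0:ℤ) < 10)]
  ring

-- splitting an emod by a factor of 10
theorem emod_split (x r : Int) (hr : 0 < r) :
    x % (10 * r) = x % 10 + 10 * ((x / 10) % r) := by
  have h1 := Int.mul_ediv_add_emod x 10
  have h2 := Int.mul_ediv_add_emod (x / 10) r
  have hs0 : 0 ≤ x % 10 := Int.emod_nonneg _ (by norm_num)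
  have hs1 : x % 10 < 10 := Int.emod_lt_of_pos _ (by norm_num)
  have ht0 : 0 ≤ (x / 10) % r := Int.emod_nonneg _ (ne_of_gt hr)
  have ht1 : (x / 10) % r < r := Int.emod_lt_of_pos _ hr
  have key : x = (x % 10 + 10 * ((x / 10) % r)) + (10 * r) * ((x / 10) / r) := by
    linarith
  calc x % (10 * r)
      = ((x % 10 + 10 * ((x / 10) % r)) + (10 * r) * ((x / 10) / r)) % (10 * r) := by
        rw [← key]
    _ = (x % 10 + 10 * ((x / 10) % r)) % (10 * r) := by
        rw [Int.add_mul_emod_self_left]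
    _ = x % 10 + 10 * ((x / 10) % r) := Int.emod_eq_of_lt (by linarith) (by linarith)

-- main characterisation of A's loop: it returns x mod the highest power of ten ≤ x
theorem pvLoopA_mod : ∀ (n : Nat) (x q : Int) (k : Nat), x.toNat ≤ n → 10 ≤ x →
    q = 10 ^ (k + 1) → q ≤ x → x < 10 * q → pvLoopA x 0 0 = x % q := by
  intro n
  induction n with
  | zero => intro x q k hn hx _ hqx _; omega
  | succ n ih =>
    intro x q k hn hx hq hqx hxq
    have hrec := pvLoopA_rec x hx
    by_cases hx100 : x < 100
    · -- here q must be 10 (k = 0)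
      have hk : k = 0 := by
        by_contra hk0
        have h2 : (100:ℤ) = 10 ^ 2 := by norm_num
        have : (100:ℤ) ≤ 10 ^ (k + 1) := by
          rw [h2]; exact pow_le_pow_right₀ (by norm_num) (by omega)
        omega
      subst hk
      have hA0 : pvLoopA (x / 10) 0 0 = 0 := by
        rw [pvLoopA, dif_neg (by omega : ¬ (10:ℤ) ≤ x / 10)]
      rw [hrec, hA0]
      simp [hq]
    · -- x ≥ 100, so k ≥ 1; recurse on x / 10 with q / 10
      rcases k with _ | k'
      · simp at hq; omega
      · have hq'pos : (0:ℤ) < 10 ^ (k' + 1) := by positivity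
        have hqsplit : q = 10 * 10 ^ (k' + 1) := by rw [hq]; ring
        have hIH : pvLoopA (x / 10) 0 0 = (x / 10) % (10 ^ (k' + 1)) := by
          apply ih (x / 10) _ k' (by omega) (by omega) rfl (by omega) (by omega)
        rw [hrec, hIH, hqsplit, emod_split x _ hq'pos]

-- B's loop returns p times a power of ten, bracketing x
theorem pvLoopB_spec : ∀ (n : Nat) (x p : Int), (x - p).toNat ≤ n → 0 < p → p ≤ x →
    ∃ k : Nat, pvLoopB x p = p * 10 ^ k ∧ p * 10 ^ k ≤ x ∧ x < p * 10 ^ (k + 1) := by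
  intro n
  induction n with
  | zero =>
    intro x p hn hp hpx
    have hstop : ¬ (0 < p ∧ p * 10 ≤ x) := by omega
    refine ⟨0, ?_, by simpa using hpx, by simpa using (by omega : x < p * 10)⟩
    rw [pvLoopB, dif_neg hstop]; ring
  | succ n ih =>
    intro x p hn hp hpx
    by_cases h : 0 < p ∧ p * 10 ≤ x
    · obtain ⟨k, h1, h2, h3⟩ := ih x (p * 10) (by omega) (by omega) h.2
      refine ⟨k + 1, ?_, by linarith [h2, (by ring : p * 10 * 10 ^ k = p * 10 ^ (k + 1))], ?_⟩
      · rw [pvLoopB, dif_pos h, h1]; ring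
      · calc x < p * 10 * 10 ^ (k + 1) := h3
          _ = p * 10 ^ (k + 1 + 1) := by ring
    · have hxlt : x < p * 10 := by omega
      refine ⟨0, ?_, by simpa using hpx, by simpa using hxlt⟩
      rw [pvLoopB, dif_neg h]; ring

-- ===== VERDICT (by name: the statement is the Claim_ definition above) =====
theorem quitar_1er_digito_spec : Claim_equal_quitar_1er_digito := by
  intro x _
  unfold Spec_quitar_1er_digito quitar_1er_digito quitar_1er_digito_alt
  by_cases hx : x < 10
  · rw [if_pos hx, pvLoopA, dif_neg (by omega : ¬ (10:ℤ) ≤ x)]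
  · rw [if_neg hx]
    rw [not_lt] at hx
    obtain ⟨k, h1, h2, h3⟩ := pvLoopB_spec (x - 10).toNat x 10 le_rfl (by norm_num) hx
    have hq : (10:ℤ) * 10 ^ k = 10 ^ (k + 1) := by ring
    have hpos : (0:ℤ) < 10 * 10 ^ k := by positivity
    rw [h1, PySem.Int.mod_eq_emod_of_pos hpos]
    exact pvLoopA_mod x.toNat x (10 * 10 ^ k) k le_rfl hx (by ring) h2
      (by linarith [h3, (by ring : (10:ℤ) * 10 ^ (k + 1) = 10 * (10 * 10 ^ k))])
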